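-- pv_equiv track=rewrite | github.com/GirugaCode/Interview-Prep | python-prep/Arrays/student_teacher.py | assignStudentsToTeacherTwo
-- ===== SOURCE A (Python) =====
-- def assignStudentsToTeacherTwo(s, t):
--     s = sorted(s)
--     t = sorted(t)
--
--     s_dict = {}
--
--
--     # for student in s:
--     #     s_dict[student] = []
--
--     # {}
--
--     for student in s:
--
--         if student not in s_dict:
--             prev = max(t) - student
--             for teacher in t:
--                 if teacher >= student:
--                     difference = teacher - student
--                     if difference <= prev:
--                         s_dict[student] = teacher
--                         prev = difference
--     return s_dict
-- ===== SOURCE B (Python) =====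
-- def assignStudentsToTeacherTwo(s, t):
--     # Two-pointer merge over sorted distinct students and sorted teachers:
--     # each student gets the first teacher >= it; one pass instead of a scan per student.
--     ts = sorted(t)
--     out = {}
--     i = 0
--     for student in sorted(set(s)):
--         while i < len(ts) and ts[i] < student:
--             i += 1
--         if i == len(ts):
--             break
--         out[student] = ts[i]
--     return out
-- ===== Notes on version B (the rewrite author's own statement) =====
-- stated objective: faster
-- what changed: Replaces A's per-student linear scan of all teachers (plus a max(t) pass per student) with a single two-pointer merge over sorted distinct students and sorted teachers.
import Mathlib
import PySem

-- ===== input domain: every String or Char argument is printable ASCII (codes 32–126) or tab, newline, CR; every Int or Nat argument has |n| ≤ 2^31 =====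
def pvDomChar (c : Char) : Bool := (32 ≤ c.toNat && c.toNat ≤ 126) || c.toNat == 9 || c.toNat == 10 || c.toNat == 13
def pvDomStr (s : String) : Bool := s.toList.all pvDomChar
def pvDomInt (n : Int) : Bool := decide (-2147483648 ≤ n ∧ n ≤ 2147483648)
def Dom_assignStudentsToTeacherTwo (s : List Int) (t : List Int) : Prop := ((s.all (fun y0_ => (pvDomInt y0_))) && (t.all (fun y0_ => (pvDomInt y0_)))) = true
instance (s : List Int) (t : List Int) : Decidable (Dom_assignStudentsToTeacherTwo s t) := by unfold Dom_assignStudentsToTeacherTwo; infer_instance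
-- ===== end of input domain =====

-- B replaces A's per-student scan of all teachers with a single two-pointer merge
-- over sorted distinct students and sorted teachers (objective: faster, asymptotic).


-- ===== PORT A =====
-- literal port of A: sort both lists, then for each student not yet in the dict,
-- prev = max(t) - student (max(t) raises ValueError on empty t, reached iff s ≠ []:
-- excluded by Pre_; the `.getD 0` below is only reached outside Pre_), then scan
-- every teacher keeping the closest teacher ≥ student seen so far.
def assignStudentsToTeacherTwo (s : List Int) (t : List Int) : List (Int × Int) :=
  let ss := PySem.List.sorted s (fun x => x) false
  let tt := PySem.List.sorted t (fun x => x) false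
  let d := ss.foldl (fun (d : PySem.Dict Int Int) student =>
    if d.contains student then d
    else
      let prev := ((PySem.List.max? tt (fun x => x)).getD 0) - student
      (tt.foldl (fun (st : PySem.Dict Int Int × Int) teacher =>
        if student ≤ teacher then
          let difference := teacher - student
          if difference ≤ st.2 then (st.1.insert student teacher, difference) else st
        else st) (d, prev)).1) PySem.Dict.empty
  d.items

-- ===== PORT B =====
-- B's for-loop over sorted(set(s)) with a persistent advancing index i into sorted(t),
-- transcribed as structural recursion on (students, remaining teachers).
def altLoop : List Int → List Int → List (Int × Int)
  | [], _ => []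
  | _ :: _, [] => []                       -- i == len(ts): break
  | st :: ss, te :: tr =>
    if te < st then altLoop (st :: ss) tr  -- while ts[i] < student: i += 1
    else (st, te) :: altLoop ss (te :: tr) -- out[student] = ts[i]
termination_by l tt => l.length + tt.length

def assignStudentsToTeacherTwo_alt (s : List Int) (t : List Int) : List (Int × Int) :=
  altLoop (PySem.List.sorted (PySem.Set.ofList s) (fun x => x) false)
          (PySem.List.sorted t (fun x => x) false)

-- ===== PRECONDITION & SPEC =====
-- Pre_ excludes exactly the inputs where Python A raises: max(t) on empty t (ValueError),
-- reached whenever s is nonempty.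
def Pre_assignStudentsToTeacherTwo (s : List Int) (t : List Int) : Prop := s = [] ∨ t ≠ []
instance (s : List Int) (t : List Int) : Decidable (Pre_assignStudentsToTeacherTwo s t) := by unfold Pre_assignStudentsToTeacherTwo; infer_instance
def pvWitness_assignStudentsToTeacherTwo : List Int × List Int := ([4, 1, 1, 7], [3, 5, 2])

def Spec_assignStudentsToTeacherTwo (s : List Int) (t : List Int) (out : List (Int × Int)) : Prop := out = assignStudentsToTeacherTwo_alt s t
instance (s : List Int) (t : List Int) (out : List (Int × Int)) : Decidable (Spec_assignStudentsToTeacherTwo s t out) := by unfold Spec_assignStudentsToTeacherTwo; infer_instance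

-- ===== CLAIM (what is proved, stated in full; the proofs are below) =====
def Claim_equal_assignStudentsToTeacherTwo : Prop := ∀ (s : List Int) (t : List Int), Dom_assignStudentsToTeacherTwo s t → Pre_assignStudentsToTeacherTwo s t → Spec_assignStudentsToTeacherTwo s t (assignStudentsToTeacherTwo s t)
-- ===== LEMMAS AND PROOFS =====

-- the common characterisation of both programs: each student (distinct, ascending)
-- paired with the first teacher ≥ it in the sorted teacher list
def specList (l tt : List Int) : List (Int × Int) :=
  l.filterMap (fun st => (tt.find? (fun te => decide (st ≤ te))).map (fun te => (st, te)))

-- adjacent dedup (keeps the last element of each run of equal elements)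
def dedupAdj : List Int → List Int
  | [] => []
  | [x] => [x]
  | x :: y :: xs => if x = y then dedupAdj (y :: xs) else x :: dedupAdj (y :: xs)

-- A's outer loop body, characterised
def gstep (tt : List Int) (d : PySem.Dict Int Int) (st : Int) : PySem.Dict Int Int :=
  if d.contains st then d
  else match tt.find? (fun te => decide (st ≤ te)) with
       | some te => d.insert st te
       | none => d

theorem altLoop_eq_specList (l tt : List Int) (hl : l.Pairwise (· ≤ ·)) :
    altLoop l tt = specList l tt := by
  induction l, tt using altLoop.induct with
  | case1 tt => simp [altLoop, specList]
  | case2 st ss => simp [altLoop, specList]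
  | case3 st ss te tr hlt ih =>
    rw [altLoop, if_pos hlt, ih hl]
    unfold specList
    apply List.filterMap_congr
    intro x hx
    have hstx : st ≤ x := by
      rcases List.mem_cons.1 hx with h | h
      · omega
      · exact (List.pairwise_cons.1 hl).1 x h
    rw [List.find?_cons_of_neg]
    simp; omega
  | case4 st ss te tr hge ih =>
    rw [altLoop, if_neg hge]
    have h1 : specList (st::ss) (te::tr) = (st, te) :: specList ss (te::tr) := by
      unfold specList
      rw [List.filterMap_cons_some]
      rw [List.find?_cons_of_pos]
      · rfl
      · simpa using by omega
    rw [h1, ih (List.pairwise_cons.1 hl).2]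

-- once A's inner loop has found the first teacher ≥ st, the rest of the scan is a no-op
theorem inner_stable (st te : Int) (hst : st ≤ te) :
    ∀ (tr : List Int) (d0 : PySem.Dict Int Int), (∀ te' ∈ tr, te ≤ te') →
    tr.foldl (fun (acc : PySem.Dict Int Int × Int) teacher =>
        if st ≤ teacher then
          if teacher - st ≤ acc.2 then (acc.1.insert st teacher, teacher - st) else acc
        else acc) (d0.insert st te, te - st) = (d0.insert st te, te - st) := by
  intro tr
  induction tr with
  | nil => intro d0 _; rfl
  | cons te' tr ih =>
    intro d0 h
    have hte : te ≤ te' := h te' (List.mem_cons_self ..)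
    simp only [List.foldl_cons, if_pos (le_trans hst hte)]
    by_cases hle : te' - st ≤ te - st
    · have : te' = te := by omega
      subst this
      rw [if_pos hle, PySem.Dict.insert_insert_self]
      exact ih d0 (fun x hx => h x (List.mem_cons_of_mem _ hx))
    · rw [if_neg hle]
      exact ih d0 (fun x hx => h x (List.mem_cons_of_mem _ hx))

-- A's inner loop inserts exactly the first teacher ≥ st (when the start slack admits it)
theorem inner_eq_find (tt : List Int) (st : Int) (hs : tt.Pairwise (· ≤ ·)) :
    ∀ (P : Int) (d : PySem.Dict Int Int), (∀ te ∈ tt, te - st ≤ P) →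
    (tt.foldl (fun (acc : PySem.Dict Int Int × Int) teacher =>
        if st ≤ teacher then
          if teacher - st ≤ acc.2 then (acc.1.insert st teacher, teacher - st) else acc
        else acc) (d, P)).1
      = match tt.find? (fun te => decide (st ≤ te)) with
        | some te => d.insert st te
        | none => d := by
  induction tt with
  | nil => intro P d _; rfl
  | cons te tr ih =>
    intro P d hP
    simp only [List.foldl_cons]
    by_cases h : st ≤ te
    · rw [if_pos h, if_pos (hP te (List.mem_cons_self ..))]
      rw [List.find?_cons_of_pos (by simpa using h)]
      rw [inner_stable st te h tr d (fun x hx => (List.pairwise_cons.1 hs).1 x hx)]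
    · rw [if_neg h, List.find?_cons_of_neg (by simpa using h)]
      exact ih (List.pairwise_cons.1 hs).2 P d (fun x hx => hP x (List.mem_cons_of_mem _ hx))

-- A's outer loop body equals gstep (max(t) bounds the initial slack)
theorem outer_eq_gstep (tt : List Int) (hs : tt.Pairwise (· ≤ ·))
    (d : PySem.Dict Int Int) (st : Int) :
    (if d.contains st then d
     else
       (tt.foldl (fun (acc : PySem.Dict Int Int × Int) teacher =>
          if st ≤ teacher then
            if teacher - st ≤ acc.2 then (acc.1.insert st teacher, teacher - st) else acc
          else acc) (d, ((PySem.List.max? tt (fun x => x)).getD 0) - st)).1)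
      = gstep tt d st := by
  unfold gstep
  by_cases hc : d.contains st
  · rw [if_pos hc, if_pos hc]
  · rw [if_neg hc, if_neg hc]
    cases htt : tt with
    | nil => rfl
    | cons a tr =>
      rw [← htt]
      have hne : tt ≠ [] := by simp [htt]
      obtain ⟨m, hm⟩ : ∃ m, PySem.List.max? tt (fun x => x) = some m := by
        cases hmx : PySem.List.max? tt (fun x => x) with
        | none => exact absurd ((PySem.List.max?_eq_none_iff _ _).1 hmx) hne
        | some m => exact ⟨m, rfl⟩
      have hmax := PySem.List.max?_isMax hm
      rw [hm]
      exact inner_eq_find tt st hs (m - st) d (fun te hte => by have := hmax te hte; simp at this; omega)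

theorem gstep_idem (tt : List Int) (d : PySem.Dict Int Int) (st : Int) :
    gstep tt (gstep tt d st) st = gstep tt d st := by
  unfold gstep
  by_cases hc : d.contains st
  · simp [hc]
  · rw [if_neg hc]
    cases hf : tt.find? (fun te => decide (st ≤ te)) with
    | some te => simp [PySem.Dict.contains_insert_self]
    | none => simp [hc]

-- duplicates in the sorted student list are no-ops
theorem foldl_gstep_dedupAdj (tt : List Int) :
    ∀ (ss : List Int) (d : PySem.Dict Int Int), ss.Pairwise (· ≤ ·) →
    ss.foldl (gstep tt) d = (dedupAdj ss).foldl (gstep tt) d := by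
  intro ss
  induction ss using dedupAdj.induct with
  | case1 => intro d _; rfl
  | case2 x => intro d _; rfl
  | case3 y xs ih =>
    intro d h
    rw [dedupAdj, if_pos rfl, ← ih d (List.pairwise_cons.1 h).2]
    simp only [List.foldl_cons, gstep_idem]
  | case4 x y xs hne ih =>
    intro d h
    rw [dedupAdj, if_neg hne]
    simp only [List.foldl_cons]
    exact ih (gstep tt d x) (List.pairwise_cons.1 h).2

-- the gstep fold over distinct fresh keys appends exactly specList
theorem foldl_gstep_fresh (tt : List Int) :
    ∀ (l : List Int) (d : PySem.Dict Int Int), d.keys.Nodup → l.Nodup →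
    (∀ x ∈ l, d.contains x = false) →
    (l.foldl (gstep tt) d).items = d.items ++ specList l tt := by
  intro l
  induction l with
  | nil => intro d _ _ _; simp [specList]
  | cons x l ih =>
    intro d hnd hl hfresh
    have hx : d.contains x = false := hfresh x (List.mem_cons_self ..)
    simp only [List.foldl_cons]
    cases hf : tt.find? (fun te => decide (x ≤ te)) with
    | some te =>
      have hg : gstep tt d x = d.insert x te := by unfold gstep; rw [if_neg (by simp [hx]), hf]
      rw [hg, ih (d.insert x te) (PySem.Dict.nodup_keys_insert _ _ _ hnd) hl.of_cons
        (fun y hy => by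
          rw [PySem.Dict.contains_insert]
          have : y ≠ x := fun h => (List.nodup_cons.1 hl).1 (h ▸ hy)
          simp [this, hfresh y (List.mem_cons_of_mem _ hy)])]
      rw [PySem.Dict.items_insert_of_not_contains _ _ hx]
      simp [specList, hf]
    | none =>
      have hg : gstep tt d x = d := by unfold gstep; rw [if_neg (by simp [hx]), hf]
      rw [hg, ih d hnd hl.of_cons (fun y hy => hfresh y (List.mem_cons_of_mem _ hy))]
      simp [specList, hf]

theorem mem_dedupAdj (l : List Int) (x : Int) : x ∈ dedupAdj l ↔ x ∈ l := by
  induction l using dedupAdj.induct with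
  | case1 => simp [dedupAdj]
  | case2 y => simp [dedupAdj]
  | case3 b xs ih => rw [dedupAdj, if_pos rfl]; simp [ih]
  | case4 a b xs hne ih => rw [dedupAdj, if_neg hne]; simp [ih]

theorem pairwise_lt_dedupAdj (l : List Int) (h : l.Pairwise (· ≤ ·)) :
    (dedupAdj l).Pairwise (· < ·) := by
  induction l using dedupAdj.induct with
  | case1 => simp [dedupAdj]
  | case2 y => simp [dedupAdj]
  | case3 b xs ih => rw [dedupAdj, if_pos rfl]; exact ih (List.pairwise_cons.1 h).2
  | case4 a b xs hne ih =>
    rw [dedupAdj, if_neg hne]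
    refine List.pairwise_cons.2 ⟨?_, ih (List.pairwise_cons.1 h).2⟩
    intro z hz
    have hz' : z ∈ b :: xs := (mem_dedupAdj _ _).1 hz
    have hab : a ≤ b := (List.pairwise_cons.1 h).1 b (List.mem_cons_self ..)
    have hbz : b ≤ z := by
      rcases List.mem_cons.1 hz' with h1 | h1
      · omega
      · exact (List.pairwise_cons.1 (List.pairwise_cons.1 h).2).1 z h1
    have : a ≠ b := hne
    omega

-- adjacent dedup of sorted(s) IS sorted(set(s))
theorem dedupAdj_sorted_eq (s : List Int) :
    dedupAdj (PySem.List.sorted s (fun x => x) false)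
      = PySem.List.sorted (PySem.Set.ofList s) (fun x => x) false := by
  have hpw : (PySem.List.sorted s (fun x => x) false).Pairwise (· ≤ ·) :=
    PySem.List.sorted_pairwise s (fun x => x)
  have hlt := pairwise_lt_dedupAdj _ hpw
  refine (PySem.List.sorted_eq_of_perm_of_pairwise_lt _ _ _ ?_ hlt).symm
  apply List.perm_of_nodup_nodup_toFinset_eq
  · exact hlt.imp (fun h => ne_of_lt h)
  · exact PySem.Set.nodup_ofList s
  · ext x
    simp [List.mem_toFinset, mem_dedupAdj, PySem.List.mem_sorted, PySem.Set.mem_ofList]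

-- ===== VERDICT (by name: the statement is the Claim_ definition above) =====
theorem assignStudentsToTeacherTwo_spec : Claim_equal_assignStudentsToTeacherTwo := by
  intro s t _ _
  unfold Spec_assignStudentsToTeacherTwo assignStudentsToTeacherTwo assignStudentsToTeacherTwo_alt
  simp only []
  have hsp : (PySem.List.sorted s (fun x => x) false).Pairwise (· ≤ ·) :=
    PySem.List.sorted_pairwise s (fun x => x)
  have htp : (PySem.List.sorted t (fun x => x) false).Pairwise (· ≤ ·) :=
    PySem.List.sorted_pairwise t (fun x => x)
  rw [List.foldl_ext _ (gstep (PySem.List.sorted t (fun x => x) false)) PySem.Dict.empty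
    (fun d st _ => outer_eq_gstep _ htp d st)]
  rw [foldl_gstep_dedupAdj _ _ _ hsp]
  rw [foldl_gstep_fresh _ _ _ (PySem.Dict.nodup_keys_empty) 
    ((pairwise_lt_dedupAdj _ hsp).imp (fun h => ne_of_lt h))
    (fun x _ => PySem.Dict.contains_empty x)]
  rw [dedupAdj_sorted_eq]
  rw [← altLoop_eq_specList _ _
    ((PySem.List.sorted_ofList_pairwise_lt s).imp (fun h => le_of_lt h))]
  rfl
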